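-- pv_equiv track=rewrite | github.com/NguyenKienPNL/Robotfor2711 | CalcModulo.py | check_opr
-- ===== SOURCE A (Python) =====
-- def check_opr(arr):
--     opr = ['+', '-', '*', '/']
--     flag = True
--     for i in arr:
--         if flag and i.isdigit() == False:
--             return False
--         elif flag == False and i not in opr:
--             return False
--         if flag == True:
--             flag = False
--         else:
--             flag = True
--     if arr[-1].isdigit() == False:
--         return False
--     return True
-- ===== SOURCE B (Python) =====
-- def check_opr(arr):
--     opr = ['+', '-', '*', '/']
--     if not all(t.isdigit() for t in arr[0::2]):
--         return False
--     if not all(t in opr for t in arr[1::2]):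
--         return False
--     if not arr[-1].isdigit():
--         return False
--     return True
-- ===== Notes on version B (the rewrite author's own statement) =====
-- stated objective: alternative
-- what changed: Replaces A's single interleaved parity-flag loop with two separate whole-subsequence passes: all even-index tokens must be digits (arr[0::2]) and all odd-index tokens must be operators (arr[1::2]), keeping the final arr[-1].isdigit() guard (so the IndexError on empty input is preserved).
import Mathlib
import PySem

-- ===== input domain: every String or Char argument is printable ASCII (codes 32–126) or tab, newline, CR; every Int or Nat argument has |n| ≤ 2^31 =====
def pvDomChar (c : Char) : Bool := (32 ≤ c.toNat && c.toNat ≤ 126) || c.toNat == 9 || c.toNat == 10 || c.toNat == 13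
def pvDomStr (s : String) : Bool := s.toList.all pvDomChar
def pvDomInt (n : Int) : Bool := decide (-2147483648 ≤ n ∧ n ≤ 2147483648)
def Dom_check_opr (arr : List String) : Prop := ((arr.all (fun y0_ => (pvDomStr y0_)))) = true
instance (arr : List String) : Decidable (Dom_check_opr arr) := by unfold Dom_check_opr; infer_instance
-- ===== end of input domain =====

-- B replaces A's interleaved parity-flag loop by two separate strided-subsequence passes; same cost, different decomposition.

-- ===== PORT A =====
-- the loop over arr with the alternating flag (both `return False` sites become `false`)
def check_opr_loop (opr : List String) : List String → Bool → Bool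
  | [], _ => true
  | i :: rest, flag =>
    if flag && !(PySem.Str.strIsdigit i) then false
    else if !flag && !(opr.contains i) then false
    else check_opr_loop opr rest (if flag then false else true)

def check_opr (arr : List String) : Bool :=
  let opr := ["+", "-", "*", "/"]
  if check_opr_loop opr arr true then
    match PySem.List.pyGet? arr (-1) with
    | none => false          -- IndexError on empty arr; excluded by Pre_check_opr
    | some last => if PySem.Str.strIsdigit last == false then false else true
  else false

-- ===== PORT B =====
def check_opr_alt (arr : List String) : Bool :=
  let opr := ["+", "-", "*", "/"]
  if !(((PySem.List.slice? arr (some 0) none 2).getD []).all PySem.Str.strIsdigit) then false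
  else if !(((PySem.List.slice? arr (some 1) none 2).getD []).all (fun t => opr.contains t)) then false
  else
    match PySem.List.pyGet? arr (-1) with
    | none => false          -- IndexError on empty arr; excluded by Pre_check_opr
    | some last => if !(PySem.Str.strIsdigit last) then false else true

-- ===== PRECONDITION & SPEC =====
-- A (and B) raise IndexError on arr[-1] when arr is empty; Pre_ excludes exactly the empty list.
def Pre_check_opr (arr : List String) : Prop := arr ≠ []
instance (arr : List String) : Decidable (Pre_check_opr arr) := by unfold Pre_check_opr; infer_instance

def pvWitness_check_opr : List String := ["1", "+", "2"]

def Spec_check_opr (arr : List String) (out : Bool) : Prop := out = check_opr_alt arr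
instance (arr : List String) (out : Bool) : Decidable (Spec_check_opr arr out) := by unfold Spec_check_opr; infer_instance

-- ===== CLAIM (what is proved, stated in full; the proofs are below) =====
def Claim_equal_check_opr : Prop := ∀ (arr : List String), Dom_check_opr arr → Pre_check_opr arr → Spec_check_opr arr (check_opr arr)

-- ===== LEMMAS AND PROOFS =====

-- even-index subsequence, as B's slice produces it
def pvEvens {α : Type} : List α → List α
  | [] => []
  | [a] => [a]
  | a :: _ :: rest => a :: pvEvens rest

lemma pvEvens_cons {α : Type} (x : α) (t : List α) : pvEvens (x :: t) = x :: pvEvens t.tail := by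
  cases t <;> simp [pvEvens]

-- the filterMap core of slice? with step 2
lemma pvFM {α : Type} : ∀ (xs : List α),
    (List.range ((xs.length + 1) / 2)).filterMap (fun k => xs[2 * k]?) = pvEvens xs
  | [] => by simp [pvEvens]
  | [a] => by simp [pvEvens, List.range_succ]
  | a :: b :: rest => by
    have ih := pvFM rest
    have hlen : ((a :: b :: rest).length + 1) / 2 = (rest.length + 1) / 2 + 1 := by
      simp; omega
    rw [hlen, List.range_succ_eq_map, List.filterMap_cons, List.filterMap_map]
    have hf : ((fun k => (a :: b :: rest)[2 * k]?) ∘ Nat.succ) = (fun k : Nat => rest[2 * k]?) := by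
      funext k
      simp only [Function.comp_def, Nat.succ_eq_add_one]
      rw [show 2 * (k + 1) = 2 * k + 1 + 1 by omega, List.getElem?_cons_succ,
        List.getElem?_cons_succ]
    rw [hf, ih]
    simp [pvEvens]

lemma pvSlice0 {α : Type} (xs : List α) :
    PySem.List.slice? xs (some 0) none 2 = some (pvEvens xs) := by
  simp only [PySem.List.slice?, PySem.List.sliceIndices]
  norm_num
  rw [show (if 0 < xs.length then (((xs.length : Int) + 2 - 1) / 2).toNat else 0)
        = (xs.length + 1) / 2 from by split_ifs <;> omega]
  rw [show (fun k : Nat => xs[(2 * (k : Int)).toNat]?) = (fun k : Nat => xs[2 * k]?) from by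
    funext k; rw [show ((2 : Int) * (k : Int)).toNat = 2 * k by omega]]
  rw [pvFM]

lemma pvSlice1 {α : Type} (xs : List α) :
    PySem.List.slice? xs (some 1) none 2 = some (pvEvens xs.tail) := by
  cases xs with
  | nil => simp [PySem.List.slice?, PySem.List.sliceIndices, pvEvens]
  | cons a t =>
    simp only [PySem.List.slice?, PySem.List.sliceIndices]
    norm_num
    rw [show (if 0 < t.length then (((t.length : Int) + 2 - 1) / 2).toNat else 0)
          = (t.length + 1) / 2 from by split_ifs <;> omega]
    rw [show (fun k : Nat => (a :: t)[(1 + 2 * (k : Int)).toNat]?) = (fun k : Nat => t[2 * k]?)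
      from by
        funext k
        rw [show ((1 : Int) + 2 * (k : Int)).toNat = 2 * k + 1 by omega,
          List.getElem?_cons_succ]]
    rw [pvFM]

-- A's loop computed as B's two subsequence checks (both flag phases at once)
lemma pvLoop (opr : List String) : ∀ (xs : List String),
    (check_opr_loop opr xs true
      = ((pvEvens xs).all PySem.Str.strIsdigit
          && (pvEvens xs.tail).all (fun t => opr.contains t)))
    ∧ (check_opr_loop opr xs false
      = ((pvEvens xs).all (fun t => opr.contains t)
          && (pvEvens xs.tail).all PySem.Str.strIsdigit)) := by
  intro xs
  induction xs with
  | nil => simp [check_opr_loop, pvEvens]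
  | cons x t ih =>
    constructor
    · cases h : PySem.Chars.strIsdigit x.toList with
      | false => simp [check_opr_loop, h, pvEvens_cons]
      | true =>
        rw [show check_opr_loop opr (x :: t) true = check_opr_loop opr t false from by
          simp [check_opr_loop, h]]
        rw [ih.2, pvEvens_cons]
        simp [h, Bool.and_comm]
    · cases h : decide (x ∈ opr) with
      | false => simp [check_opr_loop, h, pvEvens_cons]
      | true =>
        rw [show check_opr_loop opr (x :: t) false = check_opr_loop opr t true from by
          simp [check_opr_loop, h]]
        rw [ih.1, pvEvens_cons]
        simp [h, Bool.and_comm]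

-- ===== VERDICT (by name: the statement is the Claim_ definition above) =====
theorem check_opr_spec : Claim_equal_check_opr := by
  intro arr _hdom hpre
  unfold Spec_check_opr check_opr check_opr_alt
  dsimp only
  rw [pvSlice0, pvSlice1, (pvLoop _ arr).1]
  simp only [Option.getD_some]
  cases h : PySem.List.pyGet? arr (-1) with
  | none =>
    exfalso
    rw [PySem.List.pyGet?_neg_one] at h
    exact hpre (List.getLast?_eq_none_iff.mp h)
  | some last =>
    by_cases he : ((pvEvens arr).all PySem.Str.strIsdigit) = true <;>
      by_cases ho : ((pvEvens arr.tail).all (fun t => ["+", "-", "*", "/"].contains t)) = true <;>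
        by_cases hd : (PySem.Str.strIsdigit last) = true <;>
          simp [he, ho, hd] <;>
            · rw [show (!decide (∃ x ∈ pvEvens arr.tail, ¬x = "+" ∧ ¬x = "-" ∧ ¬x = "*" ∧ ¬x = "/"))
                    = decide (¬ ∃ x ∈ pvEvens arr.tail, ¬x = "+" ∧ ¬x = "-" ∧ ¬x = "*" ∧ ¬x = "/")
                  from decide_not.symm]
              congr 1
              rw [decide_eq_decide]
              push Not
              exact forall₂_congr (fun x _ => by tauto)
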